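-- pv_equiv track=rewrite | github.com/vermont42/Konjugieren | scripts/generate_verb_pdf.py | format_imperativ
-- ===== SOURCE A (Python) =====
-- COLOR_BLACK = "#000000"
--
-- COLOR_DARK_RED = "#BF0000"
--
-- def escape_xml(text: str) -> str:
--     """Escape XML special characters."""
--     return text.replace("&", "&amp;").replace("<", "&lt;").replace(">", "&gt;")
--
-- def is_formal_sie_start(chars: list[str], index: int) -> bool:
--     """Check if position is the start of formal 'Sie'."""
--     if index + 2 >= len(chars):
--         return False
--     if chars[index] != "S" or chars[index + 1] != "i" or chars[index + 2] != "e":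
--         return False
--     if index > 0 and chars[index - 1] != " ":
--         return False
--     if index + 3 < len(chars) and chars[index + 3].isalpha():
--         return False
--     return True
--
-- def mixed_case_to_xml(text: str) -> str:
--     """Convert mixed-case string to colored XML for reportlab.
--
--     Lowercase/non-letter → black (output lowercased)
--     Uppercase → dark red (output lowercased)
--     Special: 'Sie' at word boundary → always black, preserve case
--     """
--     chars = list(text)
--     result = []
--     current_regular = []
--     current_irregular = []
--     in_irregular = False
--
--     def flush_regular():
--         if current_regular:
--             result.append(
--                 f'<font color="{COLOR_BLACK}">{"".join(current_regular)}</font>'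
--             )
--             current_regular.clear()
--
--     def flush_irregular():
--         if current_irregular:
--             result.append(
--                 f'<font color="{COLOR_DARK_RED}">{"".join(current_irregular)}</font>'
--             )
--             current_irregular.clear()
--
--     for i, char in enumerate(chars):
--         part_of_sie = (
--             is_formal_sie_start(chars, i)
--             or (i > 0 and is_formal_sie_start(chars, i - 1))
--             or (i > 1 and is_formal_sie_start(chars, i - 2))
--         )
--         is_regular = char.islower() or not char.isalpha() or part_of_sie
--         canonical = char if part_of_sie else char.lower()
--         # Escape XML entities
--         canonical = escape_xml(canonical)
--
--         if is_regular:
--             if in_irregular: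
--                 flush_irregular()
--                 in_irregular = False
--             current_regular.append(canonical)
--         else:
--             if not in_irregular:
--                 flush_regular()
--                 in_irregular = True
--             current_irregular.append(canonical)
--
--     flush_regular()
--     flush_irregular()
--
--     return "".join(result)
--
-- def format_imperativ(rows: list[dict]) -> str:
--     """Format imperativ conjugations with optional pronoun prefixes."""
--     parts = []
--     for row in rows:
--         form_xml = mixed_case_to_xml(row["form"])
--         if row.get("pronoun"):
--             parts.append(f'<font color="{COLOR_BLACK}">({row["pronoun"]})</font> {form_xml}')
--         else:
--             parts.append(form_xml)
--     return f'<font color="{COLOR_BLACK}">, </font>'.join(parts)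
-- ===== SOURCE B (Python) =====
-- COLOR_BLACK = "#000000"
--
-- COLOR_DARK_RED = "#BF0000"
--
--
-- def escape_xml(text: str) -> str:
--     """Escape XML special characters."""
--     return text.replace("&", "&amp;").replace("<", "&lt;").replace(">", "&gt;")
--
--
-- def is_formal_sie_start(chars: list[str], index: int) -> bool:
--     """Check if position is the start of formal 'Sie'."""
--     if index + 2 >= len(chars):
--         return False
--     if chars[index] != "S" or chars[index + 1] != "i" or chars[index + 2] != "e":
--         return False
--     if index > 0 and chars[index - 1] != " ":
--         return False
--     if index + 3 < len(chars) and chars[index + 3].isalpha():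
--         return False
--     return True
--
--
-- def _classify(chars: list[str]) -> list[tuple[bool, str]]:
--     """Pass 1: for each char, (is_regular, escaped canonical form)."""
--     pairs = []
--     for i, char in enumerate(chars):
--         part_of_sie = (
--             is_formal_sie_start(chars, i)
--             or (i > 0 and is_formal_sie_start(chars, i - 1))
--             or (i > 1 and is_formal_sie_start(chars, i - 2))
--         )
--         is_regular = char.islower() or not char.isalpha() or part_of_sie
--         pairs.append((is_regular, escape_xml(char if part_of_sie else char.lower())))
--     return pairs
--
--
-- def _render(pairs: list[tuple[bool, str]]) -> str:
--     """Pass 2: wrap each maximal run of equal keys in one font span."""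
--     out = []
--     i = 0
--     n = len(pairs)
--     while i < n:
--         key = pairs[i][0]
--         j = i + 1
--         while j < n and pairs[j][0] == key:
--             j += 1
--         color = COLOR_BLACK if key else COLOR_DARK_RED
--         body = "".join(c for _, c in pairs[i:j])
--         out.append(f'<font color="{color}">{body}</font>')
--         i = j
--     return "".join(out)
--
--
-- def mixed_case_to_xml(text: str) -> str:
--     return _render(_classify(list(text)))
--
--
-- def _format_row(row: dict) -> str:
--     form_xml = mixed_case_to_xml(row["form"])
--     if row.get("pronoun"):
--         return f'<font color="{COLOR_BLACK}">({row["pronoun"]})</font> {form_xml}'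
--     return form_xml
--
--
-- def format_imperativ(rows: list[dict]) -> str:
--     return f'<font color="{COLOR_BLACK}">, </font>'.join(_format_row(r) for r in rows)
-- ===== Notes on version B (the rewrite author's own statement) =====
-- stated objective: alternative
-- what changed: mixed_case_to_xml's single streaming pass over flush/in_irregular buffer state is replaced by two passes: classify every character to (is_regular, escaped canonical), then render each maximal same-color run as one font span; the row loop becomes a map/join.
import Mathlib
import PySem

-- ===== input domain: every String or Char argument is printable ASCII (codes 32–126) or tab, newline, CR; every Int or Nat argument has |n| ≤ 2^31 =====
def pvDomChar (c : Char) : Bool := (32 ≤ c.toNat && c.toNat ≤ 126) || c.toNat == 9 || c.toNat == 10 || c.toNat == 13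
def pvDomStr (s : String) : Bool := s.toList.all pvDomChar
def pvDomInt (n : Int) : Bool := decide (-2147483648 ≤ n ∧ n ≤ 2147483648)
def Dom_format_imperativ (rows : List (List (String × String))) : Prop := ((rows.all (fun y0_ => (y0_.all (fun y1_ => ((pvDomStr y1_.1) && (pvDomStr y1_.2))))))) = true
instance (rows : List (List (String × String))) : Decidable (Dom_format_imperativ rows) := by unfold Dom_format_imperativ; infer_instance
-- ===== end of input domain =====

-- B rewrites mixed_case_to_xml as two passes (classify every char, then render maximal
-- same-color runs) instead of A's single pass over flush/in_irregular buffer state; same output.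

-- shared helpers (identical source code in Source A and Source B): colors, escape_xml,
-- is_formal_sie_start, the per-character classification, and the font-span f-string
def pvBlack : String := "#000000"
def pvDarkRed : String := "#BF0000"

def pvEscapeXml (text : String) : String :=
  PySem.Str.replace (PySem.Str.replace (PySem.Str.replace text "&" "&amp;") "<" "&lt;") ">" "&gt;"

-- is_formal_sie_start; every pyGetD default is unreachable: each access is guarded in range
def pvSieStart (chars : List Char) (index : Int) : Bool :=
  if index + 2 ≥ chars.length then false
  else if !(PySem.List.pyGetD chars index ' ' == 'S') || !(PySem.List.pyGetD chars (index + 1) ' ' == 'i')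
          || !(PySem.List.pyGetD chars (index + 2) ' ' == 'e') then false
  else if decide (index > 0) && !(PySem.List.pyGetD chars (index - 1) ' ' == ' ') then false
  else if decide (index + 3 < chars.length) && PySem.Chars.isalpha (PySem.List.pyGetD chars (index + 3) ' ') then false
  else true

-- one character's (is_regular, escaped canonical): A's inline let-bindings = B's pass-1 body
def pvClassify (chars : List Char) (p : Int × Char) : Bool × String :=
  let i := p.1
  let c := p.2
  let part := pvSieStart chars i || (decide (i > 0) && pvSieStart chars (i - 1))
              || (decide (i > 1) && pvSieStart chars (i - 2))
  let isReg := PySem.Chars.islower c || !PySem.Chars.isalpha c || part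
  (isReg, pvEscapeXml (String.ofList [if part then c else PySem.Chars.lowerChar c]))

def pvFont (color body : String) : String :=
  "<font color=\"" ++ color ++ "\">" ++ body ++ "</font>"

-- ===== PORT A =====
def pvFlushReg (res cur : List String) : List String × List String :=
  if cur = [] then (res, cur) else (res ++ [pvFont pvBlack (PySem.Str.join "" cur)], [])

def pvFlushIrr (res cur : List String) : List String × List String :=
  if cur = [] then (res, cur) else (res ++ [pvFont pvDarkRed (PySem.Str.join "" cur)], [])

-- A's loop body on state (result, current_regular, current_irregular, in_irregular)
def pvStepA (st : List String × List String × List String × Bool) (p : Bool × String) :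
    List String × List String × List String × Bool :=
  let (res, curR, curI, inIrr) := st
  let (isReg, canon) := p
  if isReg then
    let ri := if inIrr then pvFlushIrr res curI else (res, curI)
    (ri.1, curR ++ [canon], ri.2, false)
  else
    let rr := if !inIrr then pvFlushReg res curR else (res, curR)
    (rr.1, rr.2, curI ++ [canon], true)

-- the two final flushes and "".join(result)
def pvFinishA (st : List String × List String × List String × Bool) : String :=
  let p := pvFlushReg st.1 st.2.1
  let q := pvFlushIrr p.1 st.2.2.1
  PySem.Str.join "" q.1

def pvMixedA (text : String) : String :=
  let chars := text.toList
  pvFinishA ((PySem.List.enumerate chars).foldl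
    (fun st ic => pvStepA st (pvClassify chars ic)) ([], [], [], false))

def pvRowA (row : List (String × String)) : String :=
  let formXml := pvMixedA ((List.lookup "form" row).getD "")  -- row["form"]; missing key (KeyError) excluded by Pre_
  let pron := (List.lookup "pronoun" row).getD ""             -- row.get("pronoun"); falsy ⇔ missing or ""
  if pron ≠ "" then pvFont pvBlack ("(" ++ pron ++ ")") ++ " " ++ formXml else formXml

def format_imperativ (rows : List (List (String × String))) : String :=
  let parts := rows.foldl (fun parts row => parts ++ [pvRowA row]) []
  PySem.Str.join (pvFont pvBlack ", ") parts

-- ===== PORT B =====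
-- pass 1: classify every character
def pvClassifyAll (chars : List Char) : List (Bool × String) :=
  (PySem.List.enumerate chars).map (pvClassify chars)

-- pass 2: wrap each maximal run of equal keys in one font span
def pvRender : List (Bool × String) → String
  | [] => ""
  | (k, c) :: rest =>
    pvFont (if k then pvBlack else pvDarkRed)
        (c ++ PySem.Str.join "" ((rest.takeWhile (fun q => q.1 == k)).map (·.2)))
      ++ pvRender (rest.dropWhile (fun q => q.1 == k))
termination_by l => l.length
decreasing_by simpa using Nat.lt_succ_of_le (List.length_dropWhile_le _ rest)

def pvMixedB (text : String) : String :=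
  pvRender (pvClassifyAll text.toList)

def pvRowB (row : List (String × String)) : String :=
  let formXml := pvMixedB ((List.lookup "form" row).getD "")  -- row["form"]; missing key (KeyError) excluded by Pre_
  let pron := (List.lookup "pronoun" row).getD ""             -- row.get("pronoun"); falsy ⇔ missing or ""
  if pron ≠ "" then pvFont pvBlack ("(" ++ pron ++ ")") ++ " " ++ formXml else formXml

def format_imperativ_alt (rows : List (List (String × String))) : String :=
  PySem.Str.join (pvFont pvBlack ", ") (rows.map pvRowB)

-- ===== PRECONDITION & SPEC =====
-- A raises KeyError on a row without a "form" key; exactly those inputs are excluded (B raises there too)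
def Pre_format_imperativ (rows : List (List (String × String))) : Prop :=
  (rows.all (fun row => row.any (fun p => p.1 == "form"))) = true
instance (rows : List (List (String × String))) : Decidable (Pre_format_imperativ rows) := by
  unfold Pre_format_imperativ; infer_instance

def pvWitness_format_imperativ : (List (List (String × String))) :=
  [[("form", "Geh")], [("form", "Sehen Sie"), ("pronoun", "Sie")]]

def Spec_format_imperativ (rows : List (List (String × String))) (out : String) : Prop :=
  out = format_imperativ_alt rows
instance (rows : List (List (String × String))) (out : String) : Decidable (Spec_format_imperativ rows out) := by
  unfold Spec_format_imperativ; infer_instance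

-- ===== CLAIM (what is proved, stated in full; the proofs are below) =====
def Claim_equal_format_imperativ : Prop := ∀ (rows : List (List (String × String))),
  Dom_format_imperativ rows → Pre_format_imperativ rows →
  Spec_format_imperativ rows (format_imperativ rows)

-- ===== LEMMAS AND PROOFS =====
theorem pvJoin0_cons (x : String) (l : List String) :
    PySem.Str.join "" (x :: l) = x ++ PySem.Str.join "" l := by
  cases l with
  | nil => simp [PySem.Str.join, PySem.Chars.join_singleton]
  | cons y t =>
    simp only [PySem.Str.join, String.toList_empty, List.map_cons]
    rw [PySem.Chars.join_cons_cons]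
    simp [String.ofList_append]

theorem pvJoin0_singleton (x : String) : PySem.Str.join "" [x] = x := by
  simp [PySem.Str.join, PySem.Chars.join_singleton]

theorem pvJoin0_nil : PySem.Str.join "" ([] : List String) = "" := by
  simp [PySem.Str.join, PySem.Chars.join_nil]

theorem pvJoin0_concat (l : List String) (x : String) :
    PySem.Str.join "" (l ++ [x]) = PySem.Str.join "" l ++ x := by
  induction l with
  | nil => simp [pvJoin0_singleton, pvJoin0_nil]
  | cons y t ih => simp [pvJoin0_cons, ih, String.append_assoc]

-- merging a pending run head into a same-key group
theorem pvRender_merge (k : Bool) (s c : String) (t : List (Bool × String)) :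
    pvRender ((k, s) :: (k, c) :: t) = pvRender ((k, s ++ c) :: t) := by
  rw [pvRender, pvRender]
  simp [pvJoin0_cons, String.append_assoc]

theorem pvRender_neq (k k' : Bool) (s c : String) (t : List (Bool × String)) (h : k' ≠ k) :
    pvRender ((k, s) :: (k', c) :: t)
      = pvFont (if k then pvBlack else pvDarkRed) s ++ pvRender ((k', c) :: t) := by
  rw [pvRender]
  simp [h, pvJoin0_nil]

theorem pvRender_single (k : Bool) (s : String) :
    pvRender [(k, s)] = pvFont (if k then pvBlack else pvDarkRed) s := by
  rw [pvRender]
  simp [pvJoin0_nil, pvRender]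

-- the loop invariant: exactly one buffer is live and it is the current run
theorem pvLoop (ps : List (Bool × String)) : ∀ (res cur : List String) (k : Bool), cur ≠ [] →
    pvFinishA (List.foldl pvStepA
        (res, (if k then cur else []), (if k then [] else cur), !k) ps)
      = PySem.Str.join "" res ++ pvRender ((k, PySem.Str.join "" cur) :: ps) := by
  induction ps with
  | nil =>
    intro res cur k hcur
    cases k <;>
      simp [pvFinishA, pvFlushReg, pvFlushIrr, hcur, pvJoin0_concat, pvRender_single]
  | cons p t ih =>
    intro res cur k hcur
    obtain ⟨k', c⟩ := p
    rw [List.foldl_cons]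
    cases k <;> cases k' <;>
      simp only [pvStepA, Bool.not_true, Bool.not_false, if_true, if_false,
        Bool.false_eq_true, pvFlushReg, pvFlushIrr,
        hcur, List.nil_append]
    · -- k = false, k' = false : stay irregular
      have := ih res (cur ++ [c]) false (by simp)
      simp only [if_false, Bool.not_false, Bool.false_eq_true] at this
      rw [this, pvJoin0_concat, pvRender_merge]
    · -- k = false, k' = true : flush irregular, start regular run [c]
      have := ih (res ++ [pvFont pvDarkRed (PySem.Str.join "" cur)]) [c] true (by simp)
      simp only [if_true, Bool.not_true] at this
      rw [this, pvJoin0_concat, pvJoin0_singleton,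
        pvRender_neq false true (PySem.Str.join "" cur) c t (by simp), String.append_assoc]
      simp
    · -- k = true, k' = false : flush regular, start irregular run [c]
      have := ih (res ++ [pvFont pvBlack (PySem.Str.join "" cur)]) [c] false (by simp)
      simp only [if_false, Bool.not_false, Bool.false_eq_true] at this
      rw [this, pvJoin0_concat, pvJoin0_singleton,
        pvRender_neq true false (PySem.Str.join "" cur) c t (by simp), String.append_assoc]
      simp
    · -- k = true, k' = true : stay regular
      have := ih res (cur ++ [c]) true (by simp)
      simp only [if_true, Bool.not_true] at this
      rw [this, pvJoin0_concat, pvRender_merge]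

theorem pvMixed_eq (text : String) : pvMixedA text = pvMixedB text := by
  have h1 : pvMixedA text = pvFinishA ((PySem.List.enumerate text.toList).foldl
      (fun st ic => pvStepA st (pvClassify text.toList ic)) ([], [], [], false)) := rfl
  rw [h1, pvMixedB, pvClassifyAll,
    ← List.foldl_map (f := pvClassify text.toList) (g := pvStepA)]
  rcases h : (PySem.List.enumerate text.toList).map (pvClassify text.toList) with _ | ⟨⟨k, c⟩, t⟩
  · simp [pvFinishA, pvFlushReg, pvFlushIrr, pvJoin0_nil, pvRender]
  · rw [List.foldl_cons]
    have hstep : pvStepA ([], [], [], false) (k, c)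
        = ([], (if k then [c] else []), (if k then [] else [c]), !k) := by
      cases k <;> simp [pvStepA, pvFlushReg]
    rw [hstep, pvLoop t [] [c] k (by simp), pvJoin0_nil, pvJoin0_singleton,
      String.empty_append]

theorem pvRow_eq (row : List (String × String)) : pvRowA row = pvRowB row := by
  simp [pvRowA, pvRowB, pvMixed_eq]

-- ===== VERDICT (by name: the statement is the Claim_ definition above) =====
theorem format_imperativ_spec : Claim_equal_format_imperativ := by
  intro rows _ _
  unfold Spec_format_imperativ format_imperativ format_imperativ_alt
  rw [PySem.List.foldl_append_singleton_eq_map]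
  rw [funext pvRow_eq]; simp
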